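-- pv_equiv track=rewrite | github.com/archivy/archivy | venv/lib/python3.6/site-packages/scss/errors.py | add_error_marker
-- ===== SOURCE A (Python) =====
-- def add_error_marker(text, position, start_line=1):
--     """Add a caret marking a given position in a string of input.
--
--     Returns (new_text, caret_line).
--     """
--     indent = "    "
--     lines = []
--     caret_line = start_line
--     for line in text.split("\n"):
--         lines.append(indent + line)
--
--         if 0 <= position <= len(line):
--             lines.append(indent + (" " * position) + "^")
--             caret_line = start_line
--
--         position -= len(line)
--         position -= 1  # for the newline
--         start_line += 1
--
--     return "\n".join(lines), caret_line
-- ===== SOURCE B (Python) =====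
-- def add_error_marker(text, position, start_line=1):
--     """Add a caret marking a given position in a string of input.
--
--     Returns (new_text, caret_line).
--     """
--     indent = "    "
--     lines = text.split("\n")
--     # pass 1: locate the caret line (first line whose span contains position)
--     hit = None
--     offset = position
--     for i, line in enumerate(lines):
--         if 0 <= offset <= len(line):
--             hit = (i, offset)
--             break
--         offset -= len(line) + 1
--     # pass 2: build the output
--     out = []
--     for i, line in enumerate(lines):
--         out.append(indent + line)
--         if hit is not None and hit[0] == i:
--             out.append(indent + " " * hit[1] + "^")
--     caret_line = start_line + hit[0] if hit is not None else start_line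
--     return "\n".join(out), caret_line
-- ===== Notes on version B (the rewrite author's own statement) =====
-- stated objective: alternative
-- what changed: A interleaves caret insertion, caret-line tracking and position bookkeeping in one loop; B replaces it with a two-pass decomposition: a locating pass that finds the (unique) caret line index and column by running the offset down, then a separate rendering pass that indents lines and inserts the caret line after the recorded index.
import Mathlib
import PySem

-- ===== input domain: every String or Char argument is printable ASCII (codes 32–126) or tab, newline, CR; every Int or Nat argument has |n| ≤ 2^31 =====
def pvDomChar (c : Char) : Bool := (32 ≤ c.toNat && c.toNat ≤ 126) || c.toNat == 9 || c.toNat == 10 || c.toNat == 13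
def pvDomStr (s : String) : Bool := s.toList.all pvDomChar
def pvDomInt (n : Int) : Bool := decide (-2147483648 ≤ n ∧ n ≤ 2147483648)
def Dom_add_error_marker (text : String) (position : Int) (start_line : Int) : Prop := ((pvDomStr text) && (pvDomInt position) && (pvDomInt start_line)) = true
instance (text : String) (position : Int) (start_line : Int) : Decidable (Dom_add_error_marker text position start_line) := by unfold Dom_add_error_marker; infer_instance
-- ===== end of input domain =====

-- B replaces A's single interleaved loop by a two-pass decomposition (locate the caret line, then render); same cost, different structure.


def pvIndent : List Char := [' ', ' ', ' ', ' ']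

-- ===== PORT A =====
-- A's single loop: indent each line, maybe append the caret line, update position / start_line / caret_line.
def aLoop : List (List Char) → Int → Int → Int → List (List Char) × Int
  | [], _, _, caret => ([], caret)
  | l :: rest, pos, sl, caret =>
    if 0 ≤ pos ∧ pos ≤ (l.length : Int) then
      let r := aLoop rest (pos - l.length - 1) (sl + 1) sl
      ((pvIndent ++ l) :: (pvIndent ++ List.replicate pos.toNat ' ' ++ ['^']) :: r.1, r.2)
    else
      let r := aLoop rest (pos - l.length - 1) (sl + 1) caret
      ((pvIndent ++ l) :: r.1, r.2)

def add_error_marker (text : String) (position : Int) (start_line : Int) : String × Int :=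
  let r := aLoop (PySem.Chars.splitOn text.toList ['\n']) position start_line start_line
  (String.ofList (PySem.Chars.join ['\n'] r.1), r.2)

-- ===== PORT B =====
-- pass 1: the first line index whose span [0, len] contains the running offset, with the column there
def bLocate : List (List Char) → Int → Nat → Option (Nat × Int)
  | [], _, _ => none
  | l :: rest, off, i =>
    if 0 ≤ off ∧ off ≤ (l.length : Int) then some (i, off)
    else bLocate rest (off - l.length - 1) (i + 1)

-- pass 2: indent every line; right after line hit.1 insert the caret line
def bBuild : List (List Char) → Nat → Option (Nat × Int) → List (List Char)
  | [], _, _ => []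
  | l :: rest, i, hit =>
    match hit with
    | some (j, col) =>
      if j = i then
        (pvIndent ++ l) :: (pvIndent ++ List.replicate col.toNat ' ' ++ ['^']) :: bBuild rest (i + 1) hit
      else (pvIndent ++ l) :: bBuild rest (i + 1) hit
    | none => (pvIndent ++ l) :: bBuild rest (i + 1) hit

def add_error_marker_alt (text : String) (position : Int) (start_line : Int) : String × Int :=
  let lines := PySem.Chars.splitOn text.toList ['\n']
  let hit := bLocate lines position 0
  let out := bBuild lines 0 hit
  let caret_line := match hit with | some (j, _) => start_line + j | none => start_line
  (String.ofList (PySem.Chars.join ['\n'] out), caret_line)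

-- ===== PRECONDITION & SPEC =====
def Spec_add_error_marker (text : String) (position : Int) (start_line : Int) (out : String × Int) : Prop := out = add_error_marker_alt text position start_line
instance (text : String) (position : Int) (start_line : Int) (out : String × Int) : Decidable (Spec_add_error_marker text position start_line out) := by unfold Spec_add_error_marker; infer_instance

-- ===== CLAIM (what is proved, stated in full; the proofs are below) =====
def Claim_equal_add_error_marker : Prop := ∀ (text : String) (position : Int) (start_line : Int), Dom_add_error_marker text position start_line → Spec_add_error_marker text position start_line (add_error_marker text position start_line)

-- ===== LEMMAS AND PROOFS =====

-- once position has gone negative A never inserts a caret again and caret_line is untouched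
theorem aLoop_neg (ls : List (List Char)) (pos sl caret : Int) (h : pos < 0) :
    aLoop ls pos sl caret = (ls.map (pvIndent ++ ·), caret) := by
  induction ls generalizing pos sl with
  | nil => simp [aLoop]
  | cons l rest ih =>
    rw [aLoop, if_neg (by omega)]
    simp [ih (pos - l.length - 1) (sl + 1) (by omega)]

-- a hit index already passed: B's second pass just indents the rest
theorem bBuild_lt (ls : List (List Char)) (i j : Nat) (col : Int) (h : j < i) :
    bBuild ls i (some (j, col)) = ls.map (pvIndent ++ ·) := by
  induction ls generalizing i with
  | nil => simp [bBuild]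
  | cons l rest ih =>
    rw [bBuild]
    simp only [if_neg (by omega : ¬ j = i)]
    simp [ih (i + 1) (by omega)]

theorem bLocate_shift (ls : List (List Char)) (off : Int) (i : Nat) :
    bLocate ls off (i + 1) = (bLocate ls off i).map (fun p => (p.1 + 1, p.2)) := by
  induction ls generalizing off i with
  | nil => simp [bLocate]
  | cons l rest ih =>
    rw [bLocate, bLocate]
    by_cases h : 0 ≤ off ∧ off ≤ (l.length : Int)
    · simp [h]
    · simp only [if_neg h]
      exact ih (off - l.length - 1) (i + 1)

theorem bBuild_shift (ls : List (List Char)) (i j : Nat) (col : Int) :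
    bBuild ls (i + 1) (some (j + 1, col)) = bBuild ls i (some (j, col)) := by
  induction ls generalizing i with
  | nil => simp [bBuild]
  | cons l rest ih =>
    rw [bBuild, bBuild]
    by_cases h : j = i
    · subst h
      rw [if_pos rfl, if_pos rfl, ih (j + 1)]
    · rw [if_neg (by omega : ¬ j + 1 = i + 1), if_neg h, ih (i + 1)]

theorem bBuild_none (ls : List (List Char)) (i : Nat) :
    bBuild ls i none = ls.map (pvIndent ++ ·) := by
  induction ls generalizing i with
  | nil => simp [bBuild]
  | cons l rest ih => simp [bBuild, ih (i + 1)]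

-- the main invariant tying A's single loop to B's two passes
theorem key (ls : List (List Char)) (pos sl caret : Int) :
    aLoop ls pos sl caret =
      (bBuild ls 0 (bLocate ls pos 0),
       match bLocate ls pos 0 with | some (j, _) => sl + j | none => caret) := by
  induction ls generalizing pos sl caret with
  | nil => simp [aLoop, bLocate, bBuild]
  | cons l rest ih =>
    rw [aLoop, bLocate]
    by_cases h : 0 ≤ pos ∧ pos ≤ (l.length : Int)
    · simp only [if_pos h]
      rw [aLoop_neg rest (pos - l.length - 1) (sl + 1) sl (by omega)]
      rw [bBuild, if_pos rfl]
      simp [bBuild_lt rest 1 0 pos (by omega)]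
    · simp only [if_neg h]
      rw [ih (pos - l.length - 1) (sl + 1) caret,
          bLocate_shift rest (pos - l.length - 1) 0]
      cases hb : bLocate rest (pos - l.length - 1) 0 with
      | none => simp [bBuild, bBuild_none]
      | some p =>
        obtain ⟨j, col⟩ := p
        simp only [Option.map_some]
        rw [bBuild, if_neg (by omega : ¬ j + 1 = 0), bBuild_shift rest 0 j col]
        simp only [Prod.mk.injEq, true_and]
        push_cast
        ring

-- ===== VERDICT (by name: the statement is the Claim_ definition above) =====
theorem add_error_marker_spec : Claim_equal_add_error_marker := by
  intro text position start_line _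
  unfold Spec_add_error_marker add_error_marker add_error_marker_alt
  rw [key]
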